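-- pv_equiv track=rewrite | github.com/jmartink/hermes-homepage | scripts/generate_frames.py | animate_waves
-- ===== SOURCE A (Python) =====
-- def animate_waves(lines, f):
--     result = list(lines)
--     wave = '~.~-~.~='
--     for i, line in enumerate(lines):
--         if '~' not in line:
--             continue
--         cs = list(line)
--         j = 0
--         while j < len(cs):
--             if cs[j] in '~-.=':
--                 start = j
--                 while j < len(cs) and cs[j] in '~-.=':
--                     j += 1
--                 end = j
--                 if end - start > 3:
--                     off = (f * 2 + i * 3) % len(wave)
--                     for k in range(start, end):
--                         cs[k] = wave[(k + off) % len(wave)]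
--             else:
--                 j += 1
--         result[i] = ''.join(cs)
--     return result
-- ===== SOURCE B (Python) =====
-- def animate_waves(lines, f):
--     wave = '~.~-~.~='
--     wavey = '~-.='
--
--     def render(i, line):
--         if '~' not in line:
--             return line
--         off = (f * 2 + i * 3) % len(wave)
--         # split the line into maximal runs of same-kind characters
--         runs, cur = [], []
--         for c in line:
--             if cur and (c in wavey) == (cur[0] in wavey):
--                 cur.append(c)
--             else:
--                 if cur:
--                     runs.append(cur)
--                 cur = [c]
--         if cur:
--             runs.append(cur)
--         # render each run; wavey runs longer than 3 are animated by absolute position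
--         pieces, pos = [], 0
--         for run in runs:
--             if run[0] in wavey and len(run) > 3:
--                 pieces.append(''.join(wave[(pos + k + off) % len(wave)] for k in range(len(run))))
--             else:
--                 pieces.append(''.join(run))
--             pos += len(run)
--         return ''.join(pieces)
--
--     return [render(i, line) for i, line in enumerate(lines)]
-- ===== Notes on version B (the rewrite author's own statement) =====
-- stated objective: alternative
-- what changed: A mutates a char list in place with a two-pointer index scan per line; B first partitions each line into maximal same-kind runs in one grouping pass and then renders each run (animating wavey runs longer than 3 by absolute position) in a second pass, rebuilding the line functionally.
import Mathlib
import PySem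

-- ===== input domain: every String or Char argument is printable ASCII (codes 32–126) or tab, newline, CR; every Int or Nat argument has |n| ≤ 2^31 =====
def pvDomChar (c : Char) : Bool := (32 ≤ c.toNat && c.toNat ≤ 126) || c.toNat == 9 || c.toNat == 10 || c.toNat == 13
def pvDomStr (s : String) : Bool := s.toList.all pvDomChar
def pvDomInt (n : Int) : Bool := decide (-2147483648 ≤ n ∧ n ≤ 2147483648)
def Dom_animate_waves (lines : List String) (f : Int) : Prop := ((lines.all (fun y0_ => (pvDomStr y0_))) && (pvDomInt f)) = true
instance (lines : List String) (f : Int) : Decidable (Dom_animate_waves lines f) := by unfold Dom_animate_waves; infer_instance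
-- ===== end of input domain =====

-- B re-implements each line as "split into maximal same-kind runs, then render runs by
-- absolute position" (one grouping pass + one rendering pass) instead of A's in-place
-- two-pointer index scan; objective: alternative decomposition, same return value.


-- ===== PORT A =====

-- wave = '~.~-~.~='  (shared string constant of both Pythons)
def waveChars : List Char := ['~', '.', '~', '-', '~', '.', '~', '=']

-- c in '~-.='  (membership of a single char in the literal string)
def waveMem (c : Char) : Bool := ['~', '-', '.', '='].contains c

-- wave[n % len(wave)]  (n already ≥ 0 in both programs)
def waveAt (n : Nat) : Char := waveChars.getD (n % 8) ' '

-- inner while: 'while j < len(cs) and cs[j] in "~-.=": j += 1'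
def findRunEnd (cs : List Char) (j : Nat) : Nat :=
  if h : j < cs.length then
    if waveMem cs[j] then findRunEnd cs (j + 1) else j
  else j
termination_by cs.length - j

-- 'for k in range(start, end): cs[k] = wave[(k + off) % len(wave)]'
def writeRun (cs : List Char) (s e : Nat) (off : Nat) : List Char :=
  if s < e then writeRun (cs.set s (waveAt ((s + off) % 8))) (s + 1) e off
  else cs
termination_by e - s

-- termination facts for the outer while loop (cited by name in decreasing_by)
theorem writeRun_length (cs : List Char) (s e off : Nat) :
    (writeRun cs s e off).length = cs.length := by
  fun_induction writeRun cs s e off with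
  | case1 cs s h ih => simpa using ih
  | case2 => rfl

theorem findRunEnd_gt (cs : List Char) (j : Nat) (h : j < cs.length)
    (hw : waveMem cs[j]) : j < findRunEnd cs j := by
  rw [findRunEnd]
  simp only [h, hw, dif_pos, if_pos]
  have : j + 1 ≤ findRunEnd cs (j + 1) := by
    clear hw
    generalize hk : j + 1 = k
    clear hk h
    fun_induction findRunEnd cs k with
    | case1 k h hw ih => omega
    | case2 => omega
    | case3 => omega
  omega

-- outer while loop over j; off is recomputed inside the branch exactly as in the Python
def outerLoop (cs : List Char) (j : Nat) (f : Int) (i : Int) : List Char :=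
  if h : j < cs.length then
    if hw : waveMem cs[j] then
      let e := findRunEnd cs j
      if e - j > 3 then
        let off := (PySem.Int.mod (f * 2 + i * 3) 8).toNat
        outerLoop (writeRun cs j e off) e f i
      else outerLoop cs e f i
    else outerLoop cs (j + 1) f i
  else cs
termination_by cs.length - j
decreasing_by
  · have := findRunEnd_gt cs j h hw
    rw [writeRun_length]; omega
  · have := findRunEnd_gt cs j h hw
    omega
  · omega

def animate_waves (lines : List String) (f : Int) : List String :=
  (PySem.List.enumerate lines 0).foldl
    (fun result p =>
      if p.2.toList.contains '~' then
        result.set p.1.toNat (String.ofList (outerLoop p.2.toList 0 f p.1))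
      else result)
    lines

-- ===== PORT B =====

-- the grouping pass: 'runs, cur = [], []; for c in line: …; if cur: runs.append(cur)'
def runsOf (cs : List Char) : List (List Char) :=
  let st := cs.foldl
    (fun (st : List (List Char) × List Char) c =>
      if (match st.2 with | [] => false | d :: _ => waveMem c == waveMem d) then
        (st.1, st.2 ++ [c])
      else
        ((if st.2.isEmpty then st.1 else st.1 ++ [st.2]), [c]))
    ([], [])
  if st.2.isEmpty then st.1 else st.1 ++ [st.2]

-- the rendering pass: 'for run in runs: … ; pos += len(run)'
def renderRuns (runs : List (List Char)) (pos : Nat) (off : Nat) : List Char :=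
  match runs with
  | [] => []
  | run :: rest =>
      (if (match run with | [] => false | d :: _ => waveMem d) && decide (run.length > 3) then
        (List.range run.length).map (fun k => waveAt ((pos + k + off) % 8))
      else run) ++ renderRuns rest (pos + run.length) off

def animate_waves_alt (lines : List String) (f : Int) : List String :=
  (PySem.List.enumerate lines 0).map
    (fun p =>
      if p.2.toList.contains '~' then
        String.ofList (renderRuns (runsOf p.2.toList) 0 ((PySem.Int.mod (f * 2 + p.1 * 3) 8).toNat))
      else p.2)

-- ===== PRECONDITION & SPEC =====
def Spec_animate_waves (lines : List String) (f : Int) (out : List String) : Prop := out = animate_waves_alt lines f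
instance (lines : List String) (f : Int) (out : List String) : Decidable (Spec_animate_waves lines f out) := by unfold Spec_animate_waves; infer_instance

-- ===== CLAIM (what is proved, stated in full; the proofs are below) =====
def Claim_equal_animate_waves : Prop := ∀ (lines : List String) (f : Int), Dom_animate_waves lines f → Spec_animate_waves lines f (animate_waves lines f)

-- ===== LEMMAS AND PROOFS =====

-- functional spec of A's outer loop on the suffix starting at position p
def procSuf (t : List Char) (p off : Nat) : List Char :=
  match t with
  | [] => []
  | c :: r =>
    if waveMem c then
      (if (r.takeWhile waveMem).length + 1 > 3 then
        (List.range ((r.takeWhile waveMem).length + 1)).map (fun k => waveAt ((p + k + off) % 8))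
      else c :: r.takeWhile waveMem)
        ++ procSuf (r.dropWhile waveMem) (p + ((r.takeWhile waveMem).length + 1)) off
    else c :: procSuf r (p + 1) off
termination_by t.length
decreasing_by
  · have := List.length_dropWhile_le (p := waveMem) (l := r); simp; omega
  · simp

-- the takeWhile/dropWhile form of B's grouping pass
def chunks (cs : List Char) : List (List Char) :=
  match cs with
  | [] => []
  | c :: r =>
      (c :: r.takeWhile (fun d => waveMem d == waveMem c))
        :: chunks (r.dropWhile (fun d => waveMem d == waveMem c))
termination_by cs.length
decreasing_by
  have := List.length_dropWhile_le (p := fun d => waveMem d == waveMem c) (l := r); simp; omega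

-- two takeWhile/dropWhile facts not in the library under these shapes
theorem dropWhile_eq_drop_len {p : Char → Bool} (l : List Char) :
    l.dropWhile p = l.drop (l.takeWhile p).length := by
  induction l with
  | nil => rfl
  | cons c r ih => by_cases hc : p c <;> simp [hc, ih]

theorem takeWhile_eq_take_len {p : Char → Bool} (l : List Char) :
    l.takeWhile p = l.take (l.takeWhile p).length := by
  induction l with
  | nil => rfl
  | cons c r ih =>
      by_cases hc : p c
      · simp [hc]; exact ih
      · simp [hc]

theorem findRunEnd_eq (cs : List Char) (j : Nat) :
    findRunEnd cs j = j + ((cs.drop j).takeWhile waveMem).length := by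
  fun_induction findRunEnd cs j with
  | case1 j h hw ih =>
      rw [List.drop_eq_getElem_cons h]
      simp only [List.takeWhile_cons, hw, if_pos, List.length_cons, ih]
      omega
  | case2 j h hw =>
      rw [List.drop_eq_getElem_cons h]
      simp [hw]
  | case3 j h =>
      rw [List.drop_eq_nil_of_le (by omega)]
      simp

theorem writeRun_eq (cs : List Char) (s e off : Nat) (he : e ≤ cs.length) (hs : s ≤ e) :
    writeRun cs s e off
      = cs.take s ++ ((List.range (e - s)).map (fun k => waveAt ((s + k + off) % 8))) ++ cs.drop e := by
  revert he hs
  fun_induction writeRun cs s e off with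
  | case1 cs s h ih =>
      intro he hs
      have hsl : s < cs.length := lt_of_lt_of_le h he
      rw [ih (by simpa using he) (by omega)]
      have htake : (cs.set s (waveAt ((s + off) % 8))).take (s+1)
          = cs.take s ++ [waveAt ((s + off) % 8)] := by
        rw [List.set_eq_take_cons_drop _ hsl, List.take_append]
        simp [List.length_take, Nat.min_eq_left (le_of_lt hsl), List.take_take]
      rw [htake, List.drop_set_of_lt h]
      have h1 : e - s = (e - (s + 1)) + 1 := by omega
      rw [h1, List.range_succ_eq_map, List.map_cons, List.map_map]
      have h2 : ((fun k => waveAt ((s + k + off) % 8)) ∘ Nat.succ)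
          = fun k => waveAt ((s + 1 + k + off) % 8) := by
        funext k; simp [Function.comp]; congr 1; omega
      rw [h2]
      simp
  | case2 cs s h =>
      intro he hs
      have : s = e := by omega
      subst this
      simp [List.take_append_drop]

theorem outerLoop_eq (cs : List Char) (j : Nat) (f i : Int) :
    outerLoop cs j f i
      = cs.take j ++ procSuf (cs.drop j) j ((PySem.Int.mod (f * 2 + i * 3) 8).toNat) := by
  fun_induction outerLoop cs j f i with
  | case1 cs j h hw e hbig off ih =>
      have hdj : cs.drop j = cs[j] :: cs.drop (j+1) := List.drop_eq_getElem_cons h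
      have htl : ((cs.drop j).takeWhile waveMem) = cs[j] :: (cs.drop (j+1)).takeWhile waveMem := by
        rw [hdj, List.takeWhile_cons, if_pos hw]
      have heq : e = j + (((cs.drop (j+1)).takeWhile waveMem).length + 1) := by
        show findRunEnd cs j = _
        rw [findRunEnd_eq, htl]; rfl
      have hele : e ≤ cs.length := by
        have h1 := (List.takeWhile_prefix (l := cs.drop (j+1)) (p := waveMem)).length_le
        have h2 : (cs.drop (j+1)).length = cs.length - (j+1) := List.length_drop
        omega
      rw [ih, writeRun_eq cs j e off hele (by omega)]
      have hM : ((cs.take j ++ (List.range (e - j)).map (fun k => waveAt ((j + k + off) % 8)))).length = e := by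
        simp [List.length_take]; omega
      rw [List.append_assoc, ← List.append_assoc (cs.take j),
        List.take_left' hM, List.drop_left' hM]
      conv_rhs => rw [hdj, procSuf]
      rw [if_pos hw, if_pos (by omega : ((cs.drop (j+1)).takeWhile waveMem).length + 1 > 3)]
      have hdw : (cs.drop (j+1)).dropWhile waveMem = cs.drop e := by
        rw [dropWhile_eq_drop_len, List.drop_drop]; congr 1; omega
      rw [hdw]
      have hej : e - j = ((cs.drop (j+1)).takeWhile waveMem).length + 1 := by omega
      rw [hej]
      have hpos : j + (((cs.drop (j+1)).takeWhile waveMem).length + 1) = e := by omega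
      rw [hpos, List.append_assoc]
  | case2 cs j h hw e hbig ih =>
      have hdj : cs.drop j = cs[j] :: cs.drop (j+1) := List.drop_eq_getElem_cons h
      have htl : ((cs.drop j).takeWhile waveMem) = cs[j] :: (cs.drop (j+1)).takeWhile waveMem := by
        rw [hdj, List.takeWhile_cons, if_pos hw]
      have heq : e = j + (((cs.drop (j+1)).takeWhile waveMem).length + 1) := by
        show findRunEnd cs j = _
        rw [findRunEnd_eq, htl]; rfl
      have hdw : (cs.drop (j+1)).dropWhile waveMem = cs.drop e := by
        rw [dropWhile_eq_drop_len, List.drop_drop]; congr 1; omega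
      rw [ih]
      conv_rhs => rw [hdj, procSuf]
      have htw := takeWhile_eq_take_len (l := cs.drop (j+1)) (p := waveMem)
      set L := ((cs.drop (j+1)).takeWhile waveMem).length with hL
      rw [if_pos hw, if_neg (by omega : ¬(L + 1 > 3)), hdw]
      have hpos : j + (L + 1) = e := by omega
      rw [hpos]
      have htke : cs.take e = cs.take j ++ (cs[j] :: (cs.drop (j+1)).takeWhile waveMem) := by
        conv_rhs => rw [htw]
        rw [← hpos, List.take_add, hdj, List.take_succ_cons]
      rw [htke, List.append_assoc]
  | case3 cs j h hw ih =>
      have hdj : cs.drop j = cs[j] :: cs.drop (j+1) := List.drop_eq_getElem_cons h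
      rw [ih]
      conv_rhs => rw [hdj, procSuf]
      rw [if_neg (by simpa using hw), List.take_succ_eq_append_getElem h, List.append_assoc]
      rfl
  | case4 cs j h =>
      rw [List.drop_eq_nil_of_le (by omega), List.take_of_length_le (by omega)]
      simp [procSuf]

theorem renderRuns_chunks_cons_nonwave (c : Char) (r : List Char) (p off : Nat)
    (hc : waveMem c = false) :
    renderRuns (chunks (c :: r)) p off = c :: renderRuns (chunks r) (p + 1) off := by
  cases r with
  | nil => simp [chunks, renderRuns, hc]
  | cons d r' =>
    by_cases hd : waveMem d = true
    · simp [chunks, renderRuns, hc, hd]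
    · simp only [Bool.not_eq_true] at hd
      simp [chunks, renderRuns, hc, hd]
      congr 1
      omega

theorem procSuf_eq_chunks (t : List Char) (p off : Nat) :
    procSuf t p off = renderRuns (chunks t) p off := by
  fun_induction procSuf t p off with
  | case1 => simp [chunks, renderRuns]
  | case2 p c r hc ih => simp [chunks, renderRuns, hc, ih]
  | case3 p c r hc ih =>
      simp only [Bool.not_eq_true] at hc
      rw [renderRuns_chunks_cons_nonwave c r p off hc, ih]

-- the grouping step of runsOf, named so the loop invariant can speak about it
def groupStep : (List (List Char) × List Char) → Char → (List (List Char) × List Char) :=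
  fun st c =>
    if (match st.2 with | [] => false | d :: _ => waveMem c == waveMem d) then
      (st.1, st.2 ++ [c])
    else
      ((if st.2.isEmpty then st.1 else st.1 ++ [st.2]), [c])

theorem group_inv (cs : List Char) : ∀ (runs : List (List Char)) (c : Char) (tail : List Char),
    (∀ d ∈ tail, waveMem d = waveMem c) →
    (let st := cs.foldl groupStep (runs, c :: tail);
     if st.2.isEmpty then st.1 else st.1 ++ [st.2])
      = runs ++ (((c :: tail) ++ cs.takeWhile (fun d => waveMem d == waveMem c))
          :: chunks (cs.dropWhile (fun d => waveMem d == waveMem c))) := by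
  induction cs with
  | nil => intro runs c tail hkey; simp [chunks]
  | cons d cs' ih =>
      intro runs c tail hkey
      by_cases hdc : waveMem d = waveMem c
      · have hstep : groupStep (runs, c :: tail) d = (runs, c :: (tail ++ [d])) := by
          simp [groupStep, hdc]
        simp only [List.foldl_cons, hstep]
        have hkey' : ∀ e ∈ tail ++ [d], waveMem e = waveMem c := by
          intro e he
          rcases List.mem_append.1 he with h1 | h1
          · exact hkey e h1
          · simp at h1; subst h1; exact hdc
        rw [ih runs c (tail ++ [d]) hkey']
        rw [List.takeWhile_cons, List.dropWhile_cons]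
        simp [hdc]
      · have hstep : groupStep (runs, c :: tail) d = (runs ++ [c :: tail], [d]) := by
          simp [groupStep, hdc]
        simp only [List.foldl_cons, hstep]
        rw [ih (runs ++ [c :: tail]) d [] (by simp)]
        have hbeq : (waveMem d == waveMem c) = false := by simp [hdc]
        simp only [List.takeWhile_cons, List.dropWhile_cons, hbeq]
        conv_rhs => rw [chunks.eq_def]
        simp

theorem runsOf_eq_chunks (cs : List Char) : runsOf cs = chunks cs := by
  cases cs with
  | nil => simp [runsOf, chunks]
  | cons c cs' =>
      have h1 : runsOf (c :: cs')
          = (let st := cs'.foldl groupStep ([], [c]);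
             if st.2.isEmpty then st.1 else st.1 ++ [st.2]) := rfl
      rw [h1, group_inv cs' [] c [] (by simp)]
      conv_rhs => rw [chunks.eq_def]
      simp

theorem perLine_eq (line : List Char) (f i : Int) :
    outerLoop line 0 f i
      = renderRuns (runsOf line) 0 ((PySem.Int.mod (f * 2 + i * 3) 8).toNat) := by
  rw [outerLoop_eq, runsOf_eq_chunks, procSuf_eq_chunks]; rfl

-- per-line rendering as B computes it, and B's map written as index recursion
def lineB (f : Int) (i : Int) (line : String) : String :=
  if line.toList.contains '~' then
    String.ofList (renderRuns (runsOf line.toList) 0 ((PySem.Int.mod (f * 2 + i * 3) 8).toNat))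
  else line

def mapIdxFrom (f : Int) (k : Nat) : List String → List String
  | [] => []
  | x :: t => lineB f (k : Int) x :: mapIdxFrom f (k + 1) t

theorem foldA (f : Int) : ∀ (xs : List String) (k : Nat) (r : List String), r.drop k = xs →
    (PySem.List.enumerate xs (k : Int)).foldl
      (fun result p => if p.2.toList.contains '~' then
          result.set p.1.toNat (String.ofList (outerLoop p.2.toList 0 f p.1)) else result) r
      = r.take k ++ mapIdxFrom f k xs := by
  intro xs
  induction xs with
  | nil =>
      intro k r h
      have : r.length ≤ k := by
        by_contra hk
        rw [List.drop_eq_getElem_cons (by omega)] at h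
        cases h
      simp [PySem.List.enumerate_nil, mapIdxFrom, List.take_of_length_le this]
  | cons x t ih =>
      intro k r hdrop
      have hk : k < r.length := by
        by_contra hk
        rw [List.drop_eq_nil_of_le (by omega)] at hdrop
        cases hdrop
      have hcons := List.drop_eq_getElem_cons hk
      rw [hcons] at hdrop
      have hrk : r[k] = x := (List.cons.injEq _ _ _ _ ▸ hdrop).1
      have ht : r.drop (k + 1) = t := (List.cons.injEq _ _ _ _ ▸ hdrop).2
      rw [PySem.List.enumerate_cons, List.foldl_cons]
      have hcast : (k : Int) + 1 = ((k + 1 : Nat) : Int) := by push_cast; ring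
      rw [hcast]
      simp only [Int.toNat_natCast]
      by_cases hc : x.toList.contains '~'
      · rw [if_pos hc]
        rw [ih (k + 1) (r.set k (String.ofList (outerLoop x.toList 0 f (k : Int))))
          (by rw [List.drop_set_of_lt (by omega)]; exact ht)]
        have htake : (r.set k (String.ofList (outerLoop x.toList 0 f (k : Int)))).take (k + 1)
            = r.take k ++ [String.ofList (outerLoop x.toList 0 f (k : Int))] := by
          rw [List.set_eq_take_cons_drop _ hk, List.take_append]
          simp [List.length_take, Nat.min_eq_left (le_of_lt hk), List.take_take]
        rw [htake]
        rw [mapIdxFrom]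
        have hline : lineB f (k : Int) x
            = String.ofList (outerLoop x.toList 0 f (k : Int)) := by
          rw [lineB, if_pos hc, perLine_eq]
        rw [hline, List.append_assoc]
        rfl
      · rw [if_neg hc]
        rw [ih (k + 1) r ht]
        rw [List.take_succ_eq_append_getElem hk, hrk, mapIdxFrom]
        have hline : lineB f (k : Int) x = x := by rw [lineB, if_neg hc]
        rw [hline, List.append_assoc]
        rfl

theorem mapAlt (f : Int) : ∀ (xs : List String) (k : Nat),
    (PySem.List.enumerate xs (k : Int)).map
      (fun p => if p.2.toList.contains '~' then
          String.ofList (renderRuns (runsOf p.2.toList) 0 ((PySem.Int.mod (f * 2 + p.1 * 3) 8).toNat))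
        else p.2)
      = mapIdxFrom f k xs := by
  intro xs
  induction xs with
  | nil => intro k; simp [PySem.List.enumerate_nil, mapIdxFrom]
  | cons x t ih =>
      intro k
      rw [PySem.List.enumerate_cons, List.map_cons]
      have hcast : (k : Int) + 1 = ((k + 1 : Nat) : Int) := by push_cast; ring
      rw [hcast, ih (k + 1), mapIdxFrom]
      rw [lineB]

-- ===== VERDICT (by name: the statement is the Claim_ definition above) =====
theorem animate_waves_spec : Claim_equal_animate_waves := by
  intro lines f _
  show animate_waves lines f = animate_waves_alt lines f
  unfold animate_waves animate_waves_alt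
  have h0 : (0 : Int) = ((0 : Nat) : Int) := rfl
  rw [h0, foldA f lines 0 lines (by simp), mapAlt f lines 0]
  rfl
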